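-- pv_equiv track=rewrite | github.com/huhudaya/leetcode- | 牛客企业真题/网易/网易2019实习生招聘编程题集合/牛牛的背包问题.py | count
-- ===== SOURCE A (Python) =====
-- def count(W, V):
--     if W <= 0:
--         return 1
--     if len(V) <= 0:
--         return 1
--     if sum(V) <= W:
--         return 2 ** len(V)
--     if V[0] <= W:
--         return count(W - V[0], V[1:]) + count(W, V[1:])
--     else:
--         return count(W, V[1:])
-- ===== SOURCE B (Python) =====
-- def count(W, V):
--     n = len(V)
--     suf = [0]                      # suffix sums, built once: suf[i] = sum(V[i:])
--     for v in reversed(V):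
--         suf.append(suf[-1] + v)
--     suf.reverse()
--     total = 0
--     stack = [(W, 0)]
--     while stack:
--         w, i = stack.pop()
--         if w <= 0 or i >= n:
--             total += 1
--         elif suf[i] <= w:
--             total += 1 << (n - i)
--         else:
--             stack.append((w, i + 1))
--             if V[i] <= w:
--                 stack.append((w - V[i], i + 1))
--     return total
-- ===== Notes on version B (the rewrite author's own statement) =====
-- stated objective: alternative
-- what changed: Replaces A's naive recursion (which recomputes sum(V) and copies V[1:] at every call) by an explicit-stack index loop over suffix sums precomputed once, O(1) work per decision-tree node instead of O(n).
import Mathlib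
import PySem

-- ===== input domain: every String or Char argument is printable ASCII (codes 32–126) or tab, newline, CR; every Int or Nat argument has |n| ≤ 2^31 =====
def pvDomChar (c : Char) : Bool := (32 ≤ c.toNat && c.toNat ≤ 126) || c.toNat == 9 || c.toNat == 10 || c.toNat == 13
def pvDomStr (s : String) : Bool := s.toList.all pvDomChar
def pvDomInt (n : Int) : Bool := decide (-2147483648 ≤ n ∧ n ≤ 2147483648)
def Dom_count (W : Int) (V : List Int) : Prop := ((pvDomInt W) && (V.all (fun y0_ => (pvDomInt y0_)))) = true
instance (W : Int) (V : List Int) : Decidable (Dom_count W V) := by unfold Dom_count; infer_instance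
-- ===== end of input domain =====

-- B: explicit-stack index loop over suffix sums precomputed once, instead of A's
-- recursion that recomputes sum(V) and slices V[1:] at every call; same return value.

-- ===== PORT A =====
def count (W : Int) (V : List Int) : Int :=
  if W ≤ 0 then 1
  else
    match V with
    | [] => 1
    | v :: rest =>
      if (v :: rest).sum ≤ W then 2 ^ (v :: rest).length
      else if v ≤ W then count (W - v) rest + count W rest
      else count W rest

-- ===== PORT B =====
-- suffix sums: sufs V = [sum(V[0:]), sum(V[1:]), …, 0]  (port of Source B's reversed()
-- loop: the accumulator is Python's suf read back-to-front, so the final reverse()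
-- is already done)
def sufs (V : List Int) : List Int :=
  V.reverse.foldl (fun acc v => (acc.headD 0 + v) :: acc) [0]

-- the while-loop of Source B: explicit stack of (remaining capacity, index) frames
def countLoop (V : List Int) (n : Nat) (suf : List Int) (total : Int)
    (stack : List (Int × Nat)) : Int :=
  match stack with
  | [] => total
  | (w, i) :: rest =>
    if w ≤ 0 ∨ n ≤ i then countLoop V n suf (total + 1) rest
    else if suf.getD i 0 ≤ w then countLoop V n suf (total + 2 ^ (n - i)) rest
    else if V.getD i 0 ≤ w then
      countLoop V n suf total ((w - V.getD i 0, i + 1) :: (w, i + 1) :: rest)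
    else countLoop V n suf total ((w, i + 1) :: rest)
termination_by (stack.map (fun f => 3 ^ (n - f.2))).sum
decreasing_by
  · simp only [List.map_cons, List.sum_cons]
    have : 0 < 3 ^ (n - i) := pow_pos (by norm_num) _
    omega
  · simp only [List.map_cons, List.sum_cons]
    have : 0 < 3 ^ (n - i) := pow_pos (by norm_num) _
    omega
  · simp only [List.map_cons, List.sum_cons]
    have he : n - i = (n - (i + 1)) + 1 := by omega
    have h3 : (3:Nat) ^ (n - i) = 3 * 3 ^ (n - (i + 1)) := by
      rw [he, pow_succ]; ring
    have : 0 < 3 ^ (n - (i + 1)) := pow_pos (by norm_num) _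
    omega
  · simp only [List.map_cons, List.sum_cons]
    have he : n - i = (n - (i + 1)) + 1 := by omega
    have h3 : (3:Nat) ^ (n - i) = 3 * 3 ^ (n - (i + 1)) := by
      rw [he, pow_succ]; ring
    have : 0 < 3 ^ (n - (i + 1)) := pow_pos (by norm_num) _
    omega

def count_alt (W : Int) (V : List Int) : Int :=
  countLoop V V.length (sufs V) 0 [(W, 0)]

-- ===== PRECONDITION & SPEC =====
def Spec_count (W : Int) (V : List Int) (out : Int) : Prop := out = count_alt W V
instance (W : Int) (V : List Int) (out : Int) : Decidable (Spec_count W V out) := by unfold Spec_count; infer_instance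

-- ===== CLAIM (what is proved, stated in full; the proofs are below) =====
def Claim_equal_count : Prop := ∀ (W : Int) (V : List Int), Dom_count W V → Spec_count W V (count W V)

-- ===== LEMMAS AND PROOFS =====

lemma sufs_cons (v : Int) (rest : List Int) :
    sufs (v :: rest) = ((sufs rest).headD 0 + v) :: sufs rest := by
  simp [sufs, List.foldl_append]

lemma sufs_headD (V : List Int) : (sufs V).headD 0 = V.sum := by
  induction V with
  | nil => simp [sufs]
  | cons v rest ih =>
    rw [sufs_cons, List.headD_cons, ih, List.sum_cons, add_comm]

lemma sufs_getD (V : List Int) : ∀ i : Nat, (sufs V).getD i 0 = (V.drop i).sum := by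
  induction V with
  | nil => intro i; cases i <;> simp [sufs]
  | cons v rest ih =>
    intro i
    cases i with
    | zero =>
      rw [sufs_cons, List.getD_cons_zero, sufs_headD, List.drop_zero, List.sum_cons,
        add_comm]
    | succ j => simpa [sufs_cons] using ih j

lemma count_cons (W v : Int) (rest : List Int) (hW : ¬ W ≤ 0) :
    count W (v :: rest)
      = if (v :: rest).sum ≤ W then 2 ^ (v :: rest).length
        else if v ≤ W then count (W - v) rest + count W rest
        else count W rest := by
  conv_lhs => rw [count.eq_def]
  rw [if_neg hW]

lemma count_drop_ge (W : Int) (V : List Int) (i : Nat) (h : V.length ≤ i) :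
    count W (V.drop i) = 1 := by
  rw [List.drop_eq_nil_of_le h]
  unfold count
  split <;> simp

lemma countLoop_eq (V suf : List Int) (hs : ∀ i : Nat, suf.getD i 0 = (V.drop i).sum) :
    ∀ (total : Int) (stack : List (Int × Nat)),
      countLoop V V.length suf total stack
        = total + (stack.map (fun f => count f.1 (V.drop f.2))).sum := by
  intro total stack
  fun_induction countLoop V V.length suf total stack with
  | case1 total => simp
  | case2 total w i rest h ih =>
    rw [ih]
    rcases h with h | h
    · simp only [List.map_cons, List.sum_cons]
      rw [show count w (V.drop i) = 1 by unfold count; rw [if_pos h]]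
      ring
    · simp only [List.map_cons, List.sum_cons]
      rw [count_drop_ge _ _ _ h]; ring
  | case3 total w i rest h hsle ih =>
    have hw : ¬ w ≤ 0 := by omega
    have hi : i < V.length := by omega
    rw [ih]
    simp only [List.map_cons, List.sum_cons]
    have hd : V.drop i = V[i] :: V.drop (i + 1) := List.drop_eq_getElem_cons hi
    have hsum : (V[i] :: V.drop (i + 1)).sum = suf.getD i 0 := by rw [← hd, hs]
    have hlen : (V[i] :: V.drop (i + 1)).length = V.length - i := by
      rw [← hd, List.length_drop]
    have hc : count w (V.drop i) = 2 ^ (V.length - i) := by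
      rw [hd, count_cons _ _ _ hw, hsum, if_pos hsle, hlen]
    rw [hc]; ring
  | case4 total w i rest h hsgt hvle ih =>
    have hw : ¬ w ≤ 0 := by omega
    have hi : i < V.length := by omega
    rw [ih]
    simp only [List.map_cons, List.sum_cons]
    have hd : V.drop i = V[i] :: V.drop (i + 1) := List.drop_eq_getElem_cons hi
    have hsum : (V[i] :: V.drop (i + 1)).sum = suf.getD i 0 := by rw [← hd, hs]
    have hg : V.getD i 0 = V[i] := List.getD_eq_getElem V 0 hi
    have hc : count w (V.drop i)
        = count (w - V[i]) (V.drop (i + 1)) + count w (V.drop (i + 1)) := by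
      rw [hd, count_cons _ _ _ hw, hsum, if_neg hsgt, if_pos (hg ▸ hvle)]
    rw [hc, hg]; ring
  | case5 total w i rest h hsgt hvgt ih =>
    have hw : ¬ w ≤ 0 := by omega
    have hi : i < V.length := by omega
    rw [ih]
    simp only [List.map_cons, List.sum_cons]
    have hd : V.drop i = V[i] :: V.drop (i + 1) := List.drop_eq_getElem_cons hi
    have hsum : (V[i] :: V.drop (i + 1)).sum = suf.getD i 0 := by rw [← hd, hs]
    have hg : V.getD i 0 = V[i] := List.getD_eq_getElem V 0 hi
    have hc : count w (V.drop i) = count w (V.drop (i + 1)) := by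
      rw [hd, count_cons _ _ _ hw, hsum, if_neg hsgt, if_neg (hg ▸ hvgt)]
    rw [hc]

-- ===== VERDICT (by name: the statement is the Claim_ definition above) =====
theorem count_spec : Claim_equal_count := by
  intro W V _
  unfold Spec_count count_alt
  rw [countLoop_eq V (sufs V) (sufs_getD V)]
  simp
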